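-- pv_equiv track=rewrite | github.com/rowanwoodell/AoC2024 | Day2/Day2_Part2.py | is_safe_allow_dampening
-- ===== SOURCE A (Python) =====
-- def is_safe_allow_dampening(levels):
--     if is_safe(levels):
--         return 1
--
--     for i in range(len(levels)):
--         levels_cpy = levels[:]
--         del levels_cpy[i]
--         if is_safe(levels_cpy):
--             return 1
--
--     return 0
--
-- def is_safe(levels):
--     inc = None
--
--     for i in range(len(levels) - 1):
--         diff = levels[i] - levels[i + 1]
--
--         if diff == 0 or diff > 3  or diff < -3:
--             break
--
--         elif diff > 0 and diff < 4:
--             if i == 0: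
--                 inc = True
--             elif inc == False:
--                 break
--
--         elif diff < 0 and diff > -4:
--             if i == 0:
--                 inc = False
--             elif inc == True:
--                 break
--     else:
--         return 1
--
--     return 0
-- ===== SOURCE B (Python) =====
-- def is_safe_allow_dampening(levels):
--     # O(n): locate the first violation and try removing only the three levels around it.
--     diffs = [a - b for a, b in zip(levels, levels[1:])]
--     inc_ok = lambda x: 1 <= x <= 3
--     dec_ok = lambda x: -3 <= x <= -1
--
--     def safe(xs):
--         ds = [a - b for a, b in zip(xs, xs[1:])]
--         return all(inc_ok(x) for x in ds) or all(dec_ok(x) for x in ds)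
--
--     if safe(levels):
--         return 1
--     fi = next(k for k, x in enumerate(diffs) if not inc_ok(x))
--     fd = next(k for k, x in enumerate(diffs) if not dec_ok(x))
--     i = max(fi, fd)
--     for c in ([i - 1] if i else []) + [i, i + 1]:
--         if safe(levels[:c] + levels[c + 1:]):
--             return 1
--     return 0
-- ===== Notes on version B (the rewrite author's own statement) =====
-- stated objective: faster
-- what changed: Instead of re-checking safety after deleting every one of the n positions, B finds the first violating pair once and checks removal of only the three levels around it, which is provably sufficient.
import Mathlib
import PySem

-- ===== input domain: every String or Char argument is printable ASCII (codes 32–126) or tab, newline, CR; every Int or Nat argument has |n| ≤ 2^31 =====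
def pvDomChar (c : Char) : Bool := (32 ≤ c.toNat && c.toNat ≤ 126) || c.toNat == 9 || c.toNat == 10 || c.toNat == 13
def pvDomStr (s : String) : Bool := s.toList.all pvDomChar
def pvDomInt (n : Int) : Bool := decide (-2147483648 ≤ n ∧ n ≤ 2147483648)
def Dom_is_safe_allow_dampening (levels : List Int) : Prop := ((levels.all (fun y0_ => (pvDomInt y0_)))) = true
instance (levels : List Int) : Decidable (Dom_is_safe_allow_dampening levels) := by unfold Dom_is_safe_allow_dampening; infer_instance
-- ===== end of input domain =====

-- B replaces A's try-deleting-every-index O(n^2) scan by an O(n) check of only the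
-- three deletion candidates around the first violating pair (proved sufficient below).

-- ===== PORT A =====
-- is_safe: Python's `for i in range(len(levels)-1)` with the `inc` state and break/for-else,
-- transliterated as structural recursion over the index list (indices are always in range,
-- so `getD _ 0` is exact for `levels[i]`).
def isSafeLoopA (levels : List Int) : Option Bool → List Nat → Int
  | _, [] => 1  -- for-else: loop finished without break
  | inc, i :: rest =>
    let diff := levels.getD i 0 - levels.getD (i+1) 0
    if diff = 0 ∨ diff > 3 ∨ diff < -3 then 0
    else if diff > 0 ∧ diff < 4 then
      (if i = 0 then isSafeLoopA levels (some true) rest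
       else if inc = some false then 0
       else isSafeLoopA levels inc rest)
    else if diff < 0 ∧ diff > -4 then
      (if i = 0 then isSafeLoopA levels (some false) rest
       else if inc = some true then 0
       else isSafeLoopA levels inc rest)
    else isSafeLoopA levels inc rest

def is_safe (levels : List Int) : Int :=
  isSafeLoopA levels none (List.range (levels.length - 1))

-- `for i in range(len(levels)): levels_cpy = levels[:]; del levels_cpy[i]; if is_safe(...): return 1`
def dampLoopA (levels : List Int) : List Nat → Int
  | [] => 0
  | i :: rest =>
    if is_safe (levels.eraseIdx i) ≠ 0 then 1 else dampLoopA levels rest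

def is_safe_allow_dampening (levels : List Int) : Int :=
  if is_safe levels ≠ 0 then 1
  else dampLoopA levels (List.range levels.length)

-- ===== PORT B =====
def pyDiffs (xs : List Int) : List Int := List.zipWith (· - ·) xs xs.tail

def incOkB (x : Int) : Bool := decide (1 ≤ x ∧ x ≤ 3)

def decOkB (x : Int) : Bool := decide (-3 ≤ x ∧ x ≤ -1)

def safeB (xs : List Int) : Bool := (pyDiffs xs).all incOkB || (pyDiffs xs).all decOkB

def is_safe_allow_dampening_alt (levels : List Int) : Int :=
  if safeB levels then 1
  else
    let d := pyDiffs levels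
    let fi := d.findIdx (fun x => !incOkB x)
    let fd := d.findIdx (fun x => !decOkB x)
    let i := max fi fd
    let cands := (if i = 0 then [] else [i - 1]) ++ [i, i + 1]
    if cands.any (fun c => safeB (levels.eraseIdx c)) then 1 else 0

-- ===== PRECONDITION & SPEC =====
def Spec_is_safe_allow_dampening (levels : List Int) (out : Int) : Prop := out = is_safe_allow_dampening_alt levels
instance (levels : List Int) (out : Int) : Decidable (Spec_is_safe_allow_dampening levels out) := by unfold Spec_is_safe_allow_dampening; infer_instance

-- ===== CLAIM (what is proved, stated in full; the proofs are below) =====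
def Claim_equal_is_safe_allow_dampening : Prop := ∀ (levels : List Int), Dom_is_safe_allow_dampening levels → Spec_is_safe_allow_dampening levels (is_safe_allow_dampening levels)

-- ===== LEMMAS AND PROOFS =====

theorem pyDiffs_length (xs : List Int) : (pyDiffs xs).length = xs.length - 1 := by
  simp [pyDiffs]

theorem pyDiffs_getD (xs : List Int) (k : Nat) (hk : k < (pyDiffs xs).length) :
    (pyDiffs xs).getD k 0 = xs.getD k 0 - xs.getD (k+1) 0 := by
  have hk1 : k + 1 < xs.length := by
    have := pyDiffs_length xs; omega
  rw [List.getD_eq_getElem _ _ hk, List.getD_eq_getElem _ _ (by omega), List.getD_eq_getElem _ _ hk1]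
  simp [pyDiffs, List.getElem_zipWith, List.getElem_tail]

theorem all_iff_getD (l : List Int) (p : Int → Bool) :
    l.all p = true ↔ ∀ k, k < l.length → p (l.getD k 0) = true := by
  rw [List.all_eq_true]
  constructor
  · intro h k hk
    rw [List.getD_eq_getElem _ _ hk]
    exact h _ (List.getElem_mem hk)
  · intro h x hx
    obtain ⟨k, hk, rfl⟩ := List.mem_iff_getElem.mp hx
    rw [← List.getD_eq_getElem _ (0:Int) hk]
    exact h k hk

theorem safeB_iff (xs : List Int) :
    safeB xs = true ↔
      ((∀ k, k < xs.length - 1 → incOkB (xs.getD k 0 - xs.getD (k+1) 0) = true) ∨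
       (∀ k, k < xs.length - 1 → decOkB (xs.getD k 0 - xs.getD (k+1) 0) = true)) := by
  unfold safeB
  rw [Bool.or_eq_true, all_iff_getD, all_iff_getD, pyDiffs_length]
  have hb : ∀ k, k < xs.length - 1 → (pyDiffs xs).getD k 0 = xs.getD k 0 - xs.getD (k+1) 0 :=
    fun k hk => pyDiffs_getD xs k (by rw [pyDiffs_length]; omega)
  constructor
  · rintro (h | h)
    · exact Or.inl (fun k hk => by rw [← hb k hk]; exact h k hk)
    · exact Or.inr (fun k hk => by rw [← hb k hk]; exact h k hk)
  · rintro (h | h)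
    · exact Or.inl (fun k hk => by rw [hb k hk]; exact h k hk)
    · exact Or.inr (fun k hk => by rw [hb k hk]; exact h k hk)

def dirOkB (b : Bool) (x : Int) : Bool := if b then incOkB x else decOkB x

theorem loopA_char (xs : List Int) (b : Bool) (m : Nat) : ∀ (k : Nat), 1 ≤ k →
    isSafeLoopA xs (some b) (List.range' k m) =
      (if (List.range' k m).all (fun i => dirOkB b (xs.getD i 0 - xs.getD (i+1) 0)) then 1 else 0) := by
  induction m with
  | zero => intro k hk; simp [isSafeLoopA]
  | succ m ih =>
    intro k hk
    rw [List.range'_succ]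
    set diff := xs.getD k 0 - xs.getD (k+1) 0 with hdiff
    by_cases h0 : diff = 0 ∨ diff > 3 ∨ diff < -3
    · have hdo : dirOkB b diff = false := by
        cases b <;> simp [dirOkB, incOkB, decOkB] <;> omega
      simp only [isSafeLoopA, ← hdiff, if_pos h0, List.all_cons, hdo]
      simp
    · push_neg at h0
      obtain ⟨hne, hle, hge⟩ := h0
      by_cases hpos : diff > 0
      · have hc2 : diff > 0 ∧ diff < 4 := ⟨hpos, by omega⟩
        have hk0 : ¬ (k = 0) := by omega
        have hdo : dirOkB b diff = (if b then true else false) := by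
          cases b <;> simp [dirOkB, incOkB, decOkB] <;> omega
        cases b with
        | false =>
          simp only [isSafeLoopA, ← hdiff, if_neg (by omega : ¬ (diff = 0 ∨ diff > 3 ∨ diff < -3)),
            if_pos hc2, if_neg hk0, if_pos rfl, List.all_cons, hdo]
          simp
        | true =>
          simp only [isSafeLoopA, ← hdiff, if_neg (by omega : ¬ (diff = 0 ∨ diff > 3 ∨ diff < -3)),
            if_pos hc2, if_neg hk0, List.all_cons, hdo]
          rw [if_neg (by simp), ih (k+1) (by omega)]
          cases hX : (List.range' (k+1) m).all (fun i => dirOkB true (xs.getD i 0 - xs.getD (i+1) 0)) <;> simp [hX]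
      · have hneg : diff < 0 := by omega
        have hc3 : diff < 0 ∧ diff > -4 := ⟨hneg, by omega⟩
        have hk0 : ¬ (k = 0) := by omega
        have hdo : dirOkB b diff = (if b then false else true) := by
          cases b <;> simp [dirOkB, incOkB, decOkB] <;> omega
        cases b with
        | true =>
          simp only [isSafeLoopA, ← hdiff, if_neg (by omega : ¬ (diff = 0 ∨ diff > 3 ∨ diff < -3)),
            if_neg (by omega : ¬ (diff > 0 ∧ diff < 4)), if_pos hc3, if_neg hk0, if_pos rfl,
            List.all_cons, hdo]
          simp
        | false =>
          simp only [isSafeLoopA, ← hdiff, if_neg (by omega : ¬ (diff = 0 ∨ diff > 3 ∨ diff < -3)),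
            if_neg (by omega : ¬ (diff > 0 ∧ diff < 4)), if_pos hc3, if_neg hk0, List.all_cons, hdo]
          rw [if_neg (by simp), ih (k+1) (by omega)]
          cases hX : (List.range' (k+1) m).all (fun i => dirOkB false (xs.getD i 0 - xs.getD (i+1) 0)) <;> simp [hX]

theorem all_range'_iff (p : Nat → Bool) (a b : Nat) :
    (List.range' a b).all p = true ↔ ∀ i, a ≤ i → i < a + b → p i = true := by
  rw [List.all_eq_true]
  constructor
  · intro h i h1 h2; exact h i (List.mem_range'_1.mpr ⟨h1, h2⟩)
  · intro h i hi; obtain ⟨h1, h2⟩ := List.mem_range'_1.mp hi; exact h i h1 h2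

theorem is_safe_char (xs : List Int) : is_safe xs = (if safeB xs then 1 else 0) := by
  unfold is_safe
  match xs with
  | [] => simp [isSafeLoopA, safeB, pyDiffs]
  | [x] => simp [isSafeLoopA, safeB, pyDiffs]
  | x :: y :: rest =>
    have hn : (x :: y :: rest).length - 1 = rest.length + 1 := by simp
    rw [hn, List.range_eq_range', List.range'_succ]
    set xs := x :: y :: rest with hxs
    set d0 := xs.getD 0 0 - xs.getD 1 0 with hd0
    have hm : xs.length - 1 = rest.length + 1 := by rw [hxs]; simp
    by_cases h0 : d0 = 0 ∨ d0 > 3 ∨ d0 < -3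
    · have hsB : safeB xs = false := by
        rw [← Bool.not_eq_true, safeB_iff]
        push_neg
        have he : xs.getD 0 0 - xs.getD (0+1) 0 = d0 := by rw [hd0]
        constructor
        · exact ⟨0, by omega, by rw [he]; simp [incOkB]; omega⟩
        · exact ⟨0, by omega, by rw [he]; simp [decOkB]; omega⟩
      simp only [isSafeLoopA, ← hd0, if_pos h0, hsB]
      simp
    · push_neg at h0
      obtain ⟨hne, hle, hge⟩ := h0
      by_cases hpos : d0 > 0
      · simp only [isSafeLoopA, ← hd0, if_neg (by omega : ¬ (d0 = 0 ∨ d0 > 3 ∨ d0 < -3)),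
          if_pos (⟨hpos, by omega⟩ : d0 > 0 ∧ d0 < 4), if_pos rfl]
        rw [loopA_char xs true (rest.length) 1 (by omega)]
        have hall : (List.range' 1 rest.length).all
            (fun i => dirOkB true (xs.getD i 0 - xs.getD (i+1) 0)) = safeB xs := by
          rw [Bool.eq_iff_iff, all_range'_iff, safeB_iff]
          constructor
          · intro h
            refine Or.inl (fun k hk => ?_)
            rcases Nat.eq_zero_or_pos k with rfl | hkpos
            · have he : xs.getD 0 0 - xs.getD (0+1) 0 = d0 := by rw [hd0]
              rw [he]; simp [incOkB]; omega
            · have := h k hkpos (by omega)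
              simpa [dirOkB] using this
          · rintro (h | h)
            · intro i h1 h2
              have := h i (by omega)
              simpa [dirOkB] using this
            · have := h 0 (by omega)
              rw [show xs.getD 0 0 - xs.getD (0+1) 0 = d0 from by rw [hd0]] at this
              simp only [decOkB, decide_eq_true_eq] at this
              omega
        rw [hall]
        simp
      · have hneg : d0 < 0 := by omega
        simp only [isSafeLoopA, ← hd0, if_neg (by omega : ¬ (d0 = 0 ∨ d0 > 3 ∨ d0 < -3)),
          if_neg (by omega : ¬ (d0 > 0 ∧ d0 < 4)),
          if_pos (⟨hneg, by omega⟩ : d0 < 0 ∧ d0 > -4), if_pos rfl]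
        rw [loopA_char xs false (rest.length) 1 (by omega)]
        have hall : (List.range' 1 rest.length).all
            (fun i => dirOkB false (xs.getD i 0 - xs.getD (i+1) 0)) = safeB xs := by
          rw [Bool.eq_iff_iff, all_range'_iff, safeB_iff]
          constructor
          · intro h
            refine Or.inr (fun k hk => ?_)
            rcases Nat.eq_zero_or_pos k with rfl | hkpos
            · have he : xs.getD 0 0 - xs.getD (0+1) 0 = d0 := by rw [hd0]
              rw [he]; simp [decOkB]; omega
            · have := h k hkpos (by omega)
              simpa [dirOkB] using this
          · rintro (h | h)
            · have := h 0 (by omega)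
              rw [show xs.getD 0 0 - xs.getD (0+1) 0 = d0 from by rw [hd0]] at this
              simp only [incOkB, decide_eq_true_eq] at this
              omega
            · intro i h1 h2
              have := h i (by omega)
              simpa [dirOkB] using this
        rw [hall]
        simp

theorem dampA_char (xs : List Int) (l : List Nat) :
    dampLoopA xs l = (if l.any (fun i => safeB (xs.eraseIdx i)) then 1 else 0) := by
  induction l with
  | nil => simp [dampLoopA]
  | cons i rest ih =>
    simp only [dampLoopA, is_safe_char, List.any_cons]
    by_cases h : safeB (xs.eraseIdx i) <;> simp [h, ih]

theorem erase_getD_lo (xs : List Int) (j k : Nat) (h : k < j) (hk : k < xs.length) :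
    (xs.eraseIdx j).getD k 0 = xs.getD k 0 := by
  have hk' : k < (xs.eraseIdx j).length := by
    rw [List.length_eraseIdx]; split <;> omega
  rw [List.getD_eq_getElem _ _ hk', List.getD_eq_getElem _ _ hk, List.getElem_eraseIdx]
  simp [h]

theorem erase_getD_hi (xs : List Int) (j k : Nat) (h : j ≤ k) (hk : k + 1 < xs.length) :
    (xs.eraseIdx j).getD k 0 = xs.getD (k+1) 0 := by
  have hk' : k < (xs.eraseIdx j).length := by
    rw [List.length_eraseIdx]; split <;> omega
  rw [List.getD_eq_getElem _ _ hk', List.getD_eq_getElem _ _ hk, List.getElem_eraseIdx]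
  simp [Nat.not_lt.mpr h]

-- surviving diffs of the list with index j removed
theorem diffE_lo (xs : List Int) (j k : Nat) (h : k + 1 < j) (hk : k + 1 < xs.length) :
    (xs.eraseIdx j).getD k 0 - (xs.eraseIdx j).getD (k+1) 0 = xs.getD k 0 - xs.getD (k+1) 0 := by
  rw [erase_getD_lo xs j k (by omega) (by omega), erase_getD_lo xs j (k+1) (by omega) hk]

theorem diffE_hi (xs : List Int) (j k : Nat) (h : j ≤ k) (hk : k + 2 < xs.length) :
    (xs.eraseIdx j).getD k 0 - (xs.eraseIdx j).getD (k+1) 0 = xs.getD (k+1) 0 - xs.getD (k+2) 0 := by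
  rw [erase_getD_hi xs j k h (by omega), erase_getD_hi xs j (k+1) (by omega) (by omega)]

theorem inc_dec_disjoint (x : Int) : incOkB x = true → decOkB x = false := by
  simp [incOkB, decOkB]; omega

theorem dec_inc_disjoint (x : Int) : decOkB x = true → incOkB x = false := by
  simp [incOkB, decOkB]; omega

-- findIdx facts, phrased through getD
theorem findIdx_lt_of_not_all (l : List Int) (p : Int → Bool) (h : l.all p = false) :
    l.findIdx (fun x => !p x) < l.length := by
  apply List.findIdx_lt_length_of_exists
  rw [← Bool.not_eq_true, List.all_eq_true] at h
  push_neg at h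
  obtain ⟨x, hx, hpx⟩ := h
  exact ⟨x, hx, by simp [hpx]⟩

theorem findIdx_getD_fails (l : List Int) (p : Int → Bool)
    (h : l.findIdx (fun x => !p x) < l.length) :
    p (l.getD (l.findIdx (fun x => !p x)) 0) = false := by
  rw [List.getD_eq_getElem _ _ h]
  have := List.findIdx_getElem (p := fun x => !p x) (w := h)
  simpa using this

theorem findIdx_getD_ok (l : List Int) (p : Int → Bool) (k : Nat)
    (hk : k < l.length) (h : k < l.findIdx (fun x => !p x)) :
    p (l.getD k 0) = true := by
  rw [List.getD_eq_getElem _ _ hk]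
  have := List.not_of_lt_findIdx (p := fun x => !p x) (xs := l) h
  simpa using this

-- KEY LEMMA: if the report is unsafe and removing index j makes it safe, then j is
-- within one of i = max(first inc-violation, first dec-violation).
theorem complete_candidates (xs : List Int) (j : Nat) (hj : j < xs.length)
    (hu : safeB xs = false) (hs : safeB (xs.eraseIdx j) = true) :
    max ((pyDiffs xs).findIdx (fun x => !incOkB x)) ((pyDiffs xs).findIdx (fun x => !decOkB x)) ≤ j + 1 ∧
    j ≤ max ((pyDiffs xs).findIdx (fun x => !incOkB x)) ((pyDiffs xs).findIdx (fun x => !decOkB x)) + 1 := by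
  set D := pyDiffs xs with hD
  set m := D.length with hm
  set fi := D.findIdx (fun x => !incOkB x) with hfi
  set fd := D.findIdx (fun x => !decOkB x) with hfd
  have hmn : m = xs.length - 1 := by rw [hm, hD, pyDiffs_length]
  have huI : D.all incOkB = false := by
    cases h : D.all incOkB with
    | false => rfl
    | true =>
      have hT : safeB xs = true := by simp [safeB, ← hD, h]
      rw [hu] at hT; exact absurd hT Bool.false_ne_true
  have huD : D.all decOkB = false := by
    cases h : D.all decOkB with
    | false => rfl
    | true =>
      have hT : safeB xs = true := by simp [safeB, ← hD, h]
      rw [hu] at hT; exact absurd hT Bool.false_ne_true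
  have hfiLt : fi < m := findIdx_lt_of_not_all D incOkB huI
  have hfdLt : fd < m := findIdx_lt_of_not_all D decOkB huD
  have hfiF : incOkB (D.getD fi 0) = false := findIdx_getD_fails D incOkB hfiLt
  have hfdF : decOkB (D.getD fd 0) = false := findIdx_getD_fails D decOkB hfdLt
  have hn2 : 2 ≤ xs.length := by omega
  -- safety of the erased list, in getD form
  have hsE := (safeB_iff (xs.eraseIdx j)).mp hs
  have hlenE : (xs.eraseIdx j).length = xs.length - 1 := List.length_eraseIdx_of_lt hj
  -- getD of D in terms of xs
  have hDget : ∀ k, k < m → D.getD k 0 = xs.getD k 0 - xs.getD (k+1) 0 := by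
    intro k hk; rw [hD]; exact pyDiffs_getD xs k (by rw [pyDiffs_length]; omega)
  set i := max fi fd with hi
  by_contra hcon
  push_neg at hcon
  -- either j + 2 ≤ i or i + 2 ≤ j
  rcases Nat.lt_or_ge (j+1) i with hlo | hge
  · -- j + 2 ≤ i : diff i survives at erased index i-1, and diff (j+1) survives at erased index j
    have hiLt : i < m := by rw [hi]; omega
    -- D.getD i fails the direction that attains the max
    have hsurv_i : (xs.eraseIdx j).getD (i-1) 0 - (xs.eraseIdx j).getD (i-1+1) 0 = D.getD i 0 := by
      have h1 : i - 1 + 1 = i := by omega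
      have h2 : i - 1 + 2 = i + 1 := by omega
      rw [diffE_hi xs j (i-1) (by omega) (by omega), h1, h2, hDget i hiLt]
    have hsurv_j : (xs.eraseIdx j).getD j 0 - (xs.eraseIdx j).getD (j+1) 0 = D.getD (j+1) 0 := by
      have h3 : j + 1 + 1 = j + 2 := by omega
      rw [diffE_hi xs j j (by omega) (by omega), hDget (j+1) (by omega), h3]
    rcases Nat.le_total fi fd with hle | hle
    · -- i = fd; below fd everything is dec-ok hence not inc-ok
      have hifd : i = fd := by omega
      have hjdec : decOkB (D.getD (j+1) 0) = true :=
        findIdx_getD_ok D decOkB (j+1) (by omega) (by omega)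
      have hjinc : incOkB (D.getD (j+1) 0) = false := dec_inc_disjoint _ hjdec
      rcases hsE with hE | hE
      · have := hE j (by omega)
        rw [hsurv_j, hjinc] at this; exact Bool.false_ne_true this
      · have := hE (i-1) (by omega)
        rw [hsurv_i, hifd, hfdF] at this; exact Bool.false_ne_true this
    · have hifi : i = fi := by omega
      have hjinc : incOkB (D.getD (j+1) 0) = true :=
        findIdx_getD_ok D incOkB (j+1) (by omega) (by omega)
      have hjdec : decOkB (D.getD (j+1) 0) = false := inc_dec_disjoint _ hjinc
      rcases hsE with hE | hE
      · have := hE (i-1) (by omega)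
        rw [hsurv_i, hifi, hfiF] at this; exact Bool.false_ne_true this
      · have := hE j (by omega)
        rw [hsurv_j, hjdec] at this; exact Bool.false_ne_true this
  · -- i + 2 ≤ j : both diffs fi and fd survive unchanged below j - 1
    have hij : i + 2 ≤ j := by omega
    have hsurv : ∀ k, k ≤ i → (xs.eraseIdx j).getD k 0 - (xs.eraseIdx j).getD (k+1) 0 = D.getD k 0 := by
      intro k hk
      rw [diffE_lo xs j k (by omega) (by omega), hDget k (by rw [hi] at hk; omega)]
    rcases hsE with hE | hE
    · have := hE fi (by omega)
      rw [hsurv fi (by omega), hfiF] at this; exact Bool.false_ne_true this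
    · have := hE fd (by omega)
      rw [hsurv fd (by omega), hfdF] at this; exact Bool.false_ne_true this

-- ===== VERDICT (by name: the statement is the Claim_ definition above) =====
theorem is_safe_allow_dampening_spec : Claim_equal_is_safe_allow_dampening := by
  intro xs _
  unfold Spec_is_safe_allow_dampening is_safe_allow_dampening is_safe_allow_dampening_alt
  rw [is_safe_char, dampA_char]
  by_cases hs : safeB xs = true
  · simp [hs]
  · have hsu : safeB xs = false := by
      cases h : safeB xs with
      | false => rfl
      | true => exact absurd h hs
    rw [hsu]
    norm_num
    set D := pyDiffs xs with hD
    set fi := D.findIdx (fun x => !incOkB x) with hfi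
    set fd := D.findIdx (fun x => !decOkB x) with hfd
    set i := max fi fd with hi
    have huI : D.all incOkB = false := by
      cases h : D.all incOkB with
      | false => rfl
      | true =>
        have hT : safeB xs = true := by simp [safeB, ← hD, h]
        rw [hsu] at hT; exact absurd hT Bool.false_ne_true
    have huD : D.all decOkB = false := by
      cases h : D.all decOkB with
      | false => rfl
      | true =>
        have hT : safeB xs = true := by simp [safeB, ← hD, h]
        rw [hsu] at hT; exact absurd hT Bool.false_ne_true
    have hfiLt : fi < D.length := findIdx_lt_of_not_all D incOkB huI
    have hfdLt : fd < D.length := findIdx_lt_of_not_all D decOkB huD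
    have hmn : D.length = xs.length - 1 := by rw [hD, pyDiffs_length]
    have hiLt : i < xs.length - 1 := by rw [hi]; omega
    have hiff :
        (∃ x < xs.length, safeB (xs.eraseIdx x) = true) ↔
        (((if i = 0 then [] else [i - 1]) ++ [i, i + 1]).any (fun c => safeB (xs.eraseIdx c))) = true := by
      rw [List.any_eq_true]
      constructor
      · rintro ⟨j, hj, hjs⟩
        have hcc := complete_candidates xs j hj hsu hjs
        rw [← hD, ← hfi, ← hfd, ← hi] at hcc
        refine ⟨j, ?_, hjs⟩
        simp only [List.mem_append, List.mem_cons, List.not_mem_nil, or_false]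
        by_cases h0 : i = 0
        · rw [if_pos h0]; simp only [List.not_mem_nil, false_or]; omega
        · rw [if_neg h0]; simp only [List.mem_cons, List.not_mem_nil, or_false]; omega
      · rintro ⟨c, hcmem, hcs⟩
        refine ⟨c, ?_, hcs⟩
        simp only [List.mem_append, List.mem_cons, List.not_mem_nil, or_false] at hcmem
        by_cases h0 : i = 0
        · rw [if_pos h0] at hcmem; simp at hcmem; omega
        · rw [if_neg h0] at hcmem; simp at hcmem; omega
    simp only [hiff]
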